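-- pv_equiv track=rewrite | github.com/Tactacion/queensS | solver.py | convert_to_colored_regions
-- ===== SOURCE A (Python) =====
-- def convert_to_colored_regions(board: str, color_to_name_mapping: dict) -> tuple:
--     """Convert the board string to a dictionary of colored regions"""
--     colored_regions = {}
--     rows = board.strip().split("\n")
--     for r, row in enumerate(rows):
--         for c, color_key in enumerate(row):
--             color_name = color_to_name_mapping[color_key]
--             if color_name not in colored_regions:
--                 colored_regions[color_name] = []
--             colored_regions[color_name].append((r, c))
--     board_size = len(rows)
--     return colored_regions, board_size
-- ===== SOURCE B (Python) =====
-- def convert_to_colored_regions(board: str, color_to_name_mapping: dict) -> tuple: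
--     """Flatten the board to (name, coord) pairs, then group per first-occurrence name."""
--     rows = board.strip().split("\n")
--     pairs = [(color_to_name_mapping[ch], (r, c))
--              for r, row in enumerate(rows)
--              for c, ch in enumerate(row)]
--     order = list(dict.fromkeys(name for name, _ in pairs))
--     colored_regions = {name: [coord for n, coord in pairs if n == name] for name in order}
--     return colored_regions, len(rows)
-- ===== Notes on version B (the rewrite author's own statement) =====
-- stated objective: alternative
-- what changed: Instead of building the dict incrementally inside nested loops, B flattens the board to a list of (name, coord) pairs, computes the first-occurrence key order with dict.fromkeys, and builds each region by a per-key filter of the flat list.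
import Mathlib
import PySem

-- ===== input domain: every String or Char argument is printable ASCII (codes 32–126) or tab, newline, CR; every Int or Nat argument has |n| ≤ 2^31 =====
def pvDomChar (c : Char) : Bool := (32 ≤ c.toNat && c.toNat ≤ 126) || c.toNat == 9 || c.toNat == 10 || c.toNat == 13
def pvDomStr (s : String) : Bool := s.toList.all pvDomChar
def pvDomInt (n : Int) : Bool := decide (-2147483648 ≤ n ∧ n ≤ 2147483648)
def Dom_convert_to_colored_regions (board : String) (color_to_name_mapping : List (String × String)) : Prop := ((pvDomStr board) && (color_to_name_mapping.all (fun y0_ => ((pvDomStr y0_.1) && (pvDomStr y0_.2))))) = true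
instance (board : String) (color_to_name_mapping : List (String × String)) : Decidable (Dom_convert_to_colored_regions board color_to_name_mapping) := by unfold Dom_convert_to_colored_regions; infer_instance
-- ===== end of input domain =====

-- B groups a flat (name, coord) pair list per first-occurrence key instead of building the dict
-- incrementally inside nested loops; equally costly, just a different decomposition.

-- shared primitive: Python dict subscript on the dict parameter (first match; total form,
-- exact under Pre_, which excludes the KeyError inputs)
def pvLookup (m : List (String × String)) (k : String) : String :=
  (List.lookup k m).getD ""

-- ===== PORT A =====
def convert_to_colored_regions (board : String) (color_to_name_mapping : List (String × String)) : (List (String × List (Int × Int))) × Int :=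
  -- rows = board.strip().split("\n")  (sep ≠ "", so split? is some; exact)
  let rows := (PySem.Str.split? (PySem.Str.strip board) "\n").getD []
  let d := (PySem.List.enumerate rows 0).foldl (fun d rp =>
    (PySem.List.enumerate rp.2.toList 0).foldl (fun d cp =>
      let color_name := pvLookup color_to_name_mapping (String.mk [cp.2])
      let d' := if d.contains color_name then d else d.insert color_name ([] : List (Int × Int))
      d'.modify color_name [] (fun l => l ++ [(rp.1, cp.1)])) d)
    (PySem.Dict.empty : PySem.Dict String (List (Int × Int)))
  (d.items, (rows.length : Int))

-- ===== PORT B =====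
def convert_to_colored_regions_alt (board : String) (color_to_name_mapping : List (String × String)) : (List (String × List (Int × Int))) × Int :=
  let rows := (PySem.Str.split? (PySem.Str.strip board) "\n").getD []
  let pairs := (PySem.List.enumerate rows 0).flatMap (fun rp =>
    (PySem.List.enumerate rp.2.toList 0).map (fun cp =>
      (pvLookup color_to_name_mapping (String.mk [cp.2]), ((rp.1, cp.1) : Int × Int))))
  let order := PySem.List.dedup (pairs.map (fun p => p.1))
  (order.map (fun n => (n, (pairs.filter (fun p => p.1 == n)).map (fun p => p.2))), (rows.length : Int))

-- ===== PRECONDITION & SPEC =====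
-- Pre_ excludes exactly the inputs on which Python A raises KeyError: some board cell whose
-- one-character string is not a key of the mapping.
def Pre_convert_to_colored_regions (board : String) (color_to_name_mapping : List (String × String)) : Prop :=
  (((PySem.Str.split? (PySem.Str.strip board) "\n").getD []).all fun row =>
    row.toList.all fun ch => (List.lookup (String.mk [ch]) color_to_name_mapping).isSome) = true
instance (board : String) (color_to_name_mapping : List (String × String)) : Decidable (Pre_convert_to_colored_regions board color_to_name_mapping) := by unfold Pre_convert_to_colored_regions; infer_instance

def pvWitness_convert_to_colored_regions : String × (List (String × String)) :=
  ("RG\nGB", [("R", "red"), ("G", "green"), ("B", "blue")])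

def Spec_convert_to_colored_regions (board : String) (color_to_name_mapping : List (String × String)) (out : (List (String × List (Int × Int))) × Int) : Prop := out = convert_to_colored_regions_alt board color_to_name_mapping
instance (board : String) (color_to_name_mapping : List (String × String)) (out : (List (String × List (Int × Int))) × Int) : Decidable (Spec_convert_to_colored_regions board color_to_name_mapping out) := by unfold Spec_convert_to_colored_regions; infer_instance

-- ===== CLAIM (what is proved, stated in full; the proofs are below) =====
def Claim_equal_convert_to_colored_regions : Prop := ∀ (board : String) (color_to_name_mapping : List (String × String)), Dom_convert_to_colored_regions board color_to_name_mapping → Pre_convert_to_colored_regions board color_to_name_mapping → Spec_convert_to_colored_regions board color_to_name_mapping (convert_to_colored_regions board color_to_name_mapping)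

-- ===== LEMMAS AND PROOFS =====

-- A's "if absent insert []; then append" step is the modify-with-default step.
theorem pvStep_eq {b : Type}
    (d : PySem.Dict String (List b)) (k : String) (v : b) :
    (if d.contains k then d else d.insert k ([] : List b)).modify k []
        (fun l => l ++ [v]) = d.modify k [] (fun l => l ++ [v]) := by
  by_cases h : d.contains k
  · simp [h]
  · have hg : d.get? k = none := by
      rw [PySem.Dict.get?_eq_none_iff_not_mem_keys]
      intro hm
      apply h
      rw [PySem.Dict.contains_eq_decide_mem_keys]
      simp [hm]
    simp only [h, PySem.Dict.modify]
    simp [PySem.Dict.getD, hg, PySem.Dict.insert_insert_self]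

-- the items of a nodup-keyed dict are its keys paired with their getD values
theorem pvItems_aux {v : Type} (l : List (String × v)) (dflt : v)
    (h : (l.map Prod.fst).Nodup) :
    l = (l.map Prod.fst).map (fun k => (k, (PySem.Dict.mk l).getD k dflt)) := by
  induction l with
  | nil => rfl
  | cons p rest ih =>
    obtain ⟨k0, v0⟩ := p
    simp only [List.map_cons, List.nodup_cons] at h
    simp only [List.map_cons, List.cons.injEq]
    refine ⟨?_, ?_⟩
    · simp [PySem.Dict.getD, PySem.Dict.get?_mk_cons]
    · conv_lhs => rw [ih h.2]
      apply List.map_congr_left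
      intro k hk
      have hne : k0 ≠ k := by
        rintro rfl
        exact h.1 hk
      simp [PySem.Dict.getD, PySem.Dict.get?_mk_cons, hne]

theorem pvItems_eq_map_keys {v : Type} (d : PySem.Dict String v) (dflt : v)
    (h : d.keys.Nodup) :
    d.items = d.keys.map (fun k => (k, d.getD k dflt)) := by
  cases d with
  | mk l =>
    have hk : (PySem.Dict.mk l).keys = l.map Prod.fst := rfl
    rw [hk] at h ⊢
    exact pvItems_aux l dflt h

theorem pv_main (board : String) (m : List (String × String)) :
    convert_to_colored_regions board m = convert_to_colored_regions_alt board m := by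
  unfold convert_to_colored_regions convert_to_colored_regions_alt
  generalize ((PySem.Str.split? (PySem.Str.strip board) "\n").getD [] : List String) = rows
  set P := (PySem.List.enumerate rows 0).flatMap (fun rp =>
    (PySem.List.enumerate rp.2.toList 0).map (fun cp =>
      (pvLookup m (String.mk [cp.2]), ((rp.1, cp.1) : Int × Int)))) with hP
  have hfold : (PySem.List.enumerate rows 0).foldl (fun d rp =>
      (PySem.List.enumerate rp.2.toList 0).foldl (fun d cp =>
        let color_name := pvLookup m (String.mk [cp.2])
        let d' := if d.contains color_name then d else d.insert color_name ([] : List (Int × Int))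
        d'.modify color_name [] (fun l => l ++ [(rp.1, cp.1)])) d)
      (PySem.Dict.empty : PySem.Dict String (List (Int × Int)))
      = P.foldl (fun d p => d.modify p.1 [] (fun l => l ++ [p.2])) PySem.Dict.empty := by
    rw [hP, List.foldl_flatMap]
    congr 1
    funext acc rp
    rw [List.foldl_map]
    congr 1
    funext d cp
    exact pvStep_eq d _ _
  simp only [hfold]
  congr 1
  have hnodup : (P.foldl (fun d p => d.modify p.1 [] (fun l => l ++ [p.2]))
      (PySem.Dict.empty : PySem.Dict String (List (Int × Int)))).keys.Nodup :=
    PySem.Dict.nodup_keys_foldl_modify_key P Prod.fst _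
      (fun _ p => (fun l => l ++ [p.2])) _ List.nodup_nil
  have hkeys : (P.foldl (fun d p => d.modify p.1 [] (fun l => l ++ [p.2]))
      (PySem.Dict.empty : PySem.Dict String (List (Int × Int)))).keys
      = PySem.List.dedup (P.map (fun p => p.1)) := by
    have h1 := PySem.Dict.keys_foldl_modify_key P Prod.fst ([] : List (Int × Int))
      (fun _ p => (fun l => l ++ [p.2])) (PySem.Dict.empty : PySem.Dict String (List (Int × Int)))
    rw [h1]
    rw [show (PySem.Dict.empty : PySem.Dict String (List (Int × Int))).keys = [] from rfl]
    rw [PySem.Set.update_nil_left, PySem.List.dedup_eq_ofList]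
  rw [pvItems_eq_map_keys _ ([] : List (Int × Int)) hnodup, hkeys]
  apply List.map_congr_left
  intro k _
  rw [PySem.Dict.getD_foldl_modify_append P
    (PySem.Dict.empty : PySem.Dict String (List (Int × Int))) k,
    PySem.Dict.getD_empty, List.nil_append, ← hP]

-- ===== VERDICT (by name: the statement is the Claim_ definition above) =====
theorem convert_to_colored_regions_spec : Claim_equal_convert_to_colored_regions := by
  intro board m _ _
  exact (pv_main board m).symm ▸ rfl
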